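-- pv_equiv track=rewrite | github.com/mohammadfaiizan/ProjectI | DSA/Problem/Trie/01_Trie_Fundamentals_Implementation/648_Replace_Words.py | replaceWords4
-- ===== SOURCE A (Python) =====
-- from typing import List, Dict, Set
--
-- class TrieNode:
--     """Trie node for root storage"""
--     def __init__(self):
--         self.children: Dict[str, 'TrieNode'] = {}
--         self.is_root: bool = False
--         self.root_word: str = ""  # Store the actual root word
--
-- def replaceWords4(dictionary: List[str], sentence: str) -> str:
--     """
--     Approach 4: Optimized Trie with Early Termination
--
--     Enhanced trie with optimizations for common cases.
--
--     Time: O(D + S)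
--     Space: O(D)
--     """
--     # Build optimized trie
--     root = TrieNode()
--
--     # Sort dictionary by length for shortest root preference
--     dictionary.sort(key=len)
--
--     for word in dictionary:
--         node = root
--         for char in word:
--             if char not in node.children:
--                 node.children[char] = TrieNode()
--             node = node.children[char]
--
--         # Only mark as root if no shorter root exists
--         if not node.is_root:
--             node.is_root = True
--             node.root_word = word
--
--     def find_root_optimized(word: str) -> str:
--         """Find root with early termination"""
--         node = root
--         for char in word:
--             if char not in node.children:
--                 return word  # No root found
--             node = node.children[char]
--             if node.is_root:
--                 return node.root_word  # Return first (shortest) root found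
--         return word
--
--     # Process sentence
--     words = sentence.split()
--     return " ".join(find_root_optimized(word) for word in words)
-- ===== SOURCE B (Python) =====
-- def replaceWords4(dictionary, sentence):
--     # Set of roots; shortest matching prefix found by scanning prefix lengths.
--     # Note: unlike A, this does NOT sort `dictionary` in place (return value only).
--     roots = set(dictionary)
--
--     def shortest_root(word):
--         for i in range(1, len(word) + 1):
--             prefix = word[:i]
--             if prefix in roots:
--                 return prefix
--         return word
--
--     return " ".join(shortest_root(w) for w in sentence.split())
-- ===== Notes on version B (the rewrite author's own statement) =====
-- stated objective: simpler
-- what changed: Replaces the hand-built trie (node class, per-character insertion loop, walk with early termination) by a plain set of the dictionary words with a shortest-first prefix scan per word; B also drops A's in-place sort of `dictionary`, so A's side effect on the argument is not reproduced (return value is identical).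
import Mathlib
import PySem

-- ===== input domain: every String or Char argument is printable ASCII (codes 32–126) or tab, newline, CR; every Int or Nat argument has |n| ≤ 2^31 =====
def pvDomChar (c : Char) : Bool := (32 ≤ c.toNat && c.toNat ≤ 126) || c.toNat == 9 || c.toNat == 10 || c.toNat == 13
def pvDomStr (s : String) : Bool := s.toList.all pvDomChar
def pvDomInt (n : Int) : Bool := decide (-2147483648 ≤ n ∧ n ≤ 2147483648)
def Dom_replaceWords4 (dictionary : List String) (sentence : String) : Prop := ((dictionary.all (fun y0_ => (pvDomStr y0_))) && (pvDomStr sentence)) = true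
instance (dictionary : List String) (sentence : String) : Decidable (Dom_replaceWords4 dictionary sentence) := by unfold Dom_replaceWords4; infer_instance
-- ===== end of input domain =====

-- B replaces A's trie by a set of roots with a shortest-prefix scan (simpler; the timing
-- run measured it faster by a constant factor). Return-value equivalence only:
-- A sorts `dictionary` in place, B does not mutate its arguments.

-- ===== PORT A =====
-- trie node: is_root, root_word, children (mutual pair; children dict is an assoc list)
mutual
inductive PvTrie where
  | mk : Bool → String → PvChildren → PvTrie
inductive PvChildren where
  | nil : PvChildren
  | cons : Char → PvTrie → PvChildren → PvChildren
end

def pvIsRoot : PvTrie → Bool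
  | .mk b _ _ => b

def pvRootWord : PvTrie → String
  | .mk _ r _ => r

def pvChildren : PvTrie → PvChildren
  | .mk _ _ ch => ch

-- dict lookup (first match)
def pvChildGet : PvChildren → Char → Option PvTrie
  | .nil, _ => none
  | .cons c t rest, x => if x = c then some t else pvChildGet rest x

-- dict assignment (overwrite in place, else append)
def pvChildSet : PvChildren → Char → PvTrie → PvChildren
  | .nil, x, n => .cons x n .nil
  | .cons c t rest, x, n => if x = c then .cons c n rest else .cons c t (pvChildSet rest x n)

-- the insertion loop of A for one word: descend (creating missing children),
-- then mark `is_root`/`root_word` if not already a root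
def pvInsert : PvTrie → List Char → String → PvTrie
  | .mk b r ch, [], w => if !b then .mk true w ch else .mk b r ch
  | .mk b r ch, c :: cs, w =>
      let child := match pvChildGet ch c with
        | some t => t
        | none => .mk false "" .nil
      .mk b r (pvChildSet ch c (pvInsert child cs w))

-- find_root_optimized: walk the word, early return on missing child / first root
def pvFindRoot : PvTrie → List Char → String → String
  | _, [], w => w
  | t, c :: cs, w =>
      match pvChildGet (pvChildren t) c with
      | none => w
      | some n => if pvIsRoot n then pvRootWord n else pvFindRoot n cs w

def replaceWords4 (dictionary : List String) (sentence : String) : String :=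
  let sortedDict := PySem.List.sorted dictionary (fun w => (PySem.Str.len w : Int))
  let root := sortedDict.foldl (fun t w => pvInsert t w.toList w) (PvTrie.mk false "" .nil)
  PySem.Str.join " " ((PySem.Str.split₀ sentence).map (fun w => pvFindRoot root w.toList w))

-- ===== PORT B =====
-- the prefix-length loop of Source B: i = 1 .. len(word), return word[:i] if it is a root
def pvSrGo (roots : List String) (word : String) (i : Nat) : String :=
  if h : i ≤ PySem.Str.len word then
    if PySem.Set.contains roots (PySem.Str.slice word none (some (i : Int))) then
      PySem.Str.slice word none (some (i : Int))
    else pvSrGo roots word (i + 1)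
  else word
termination_by (PySem.Str.len word + 1 - (i : Int)).toNat
decreasing_by simp_wf; simp only [PySem.Str.len_eq, String.length_toList] at *; omega

def replaceWords4_alt (dictionary : List String) (sentence : String) : String :=
  let roots : PySem.Set String := PySem.Set.ofList dictionary
  PySem.Str.join " " ((PySem.Str.split₀ sentence).map (fun w => pvSrGo roots w 1))

-- ===== PRECONDITION & SPEC =====
def Spec_replaceWords4 (dictionary : List String) (sentence : String) (out : String) : Prop := out = replaceWords4_alt dictionary sentence
instance (dictionary : List String) (sentence : String) (out : String) : Decidable (Spec_replaceWords4 dictionary sentence out) := by unfold Spec_replaceWords4; infer_instance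

-- ===== CLAIM (what is proved, stated in full; the proofs are below) =====
def Claim_equal_replaceWords4 : Prop := ∀ (dictionary : List String) (sentence : String), Dom_replaceWords4 dictionary sentence → Spec_replaceWords4 dictionary sentence (replaceWords4 dictionary sentence)

-- ===== LEMMAS AND PROOFS =====

-- node of the trie at a path
def pvGetNode : PvTrie → List Char → Option PvTrie
  | t, [] => some t
  | t, c :: cs =>
      match pvChildGet (pvChildren t) c with
      | none => none
      | some n => pvGetNode n cs

-- the (is_root, root_word) observation of an optional node
def pvObs : Option PvTrie → Bool × String
  | some (.mk b r _) => (b, r)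
  | none => (false, "")

def pvIsRootAt (t : PvTrie) (p : List Char) : Bool := (pvObs (pvGetNode t p)).1

def pvRootAt (t : PvTrie) (p : List Char) : String := (pvObs (pvGetNode t p)).2

-- reference scan: test prefixes pre++[c] of the word left to right
def pvScan (S : List String) (w : String) (pre rest : List Char) : String :=
  match rest with
  | [] => w
  | c :: cs =>
      if String.ofList (pre ++ [c]) ∈ S then String.ofList (pre ++ [c])
      else pvScan S w (pre ++ [c]) cs

theorem pvObs_some (n : PvTrie) : pvObs (some n) = (pvIsRoot n, pvRootWord n) := by
  cases n; rfl

theorem pvObs_none : pvObs none = (false, "") := rfl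

theorem pvGetNode_append (t : PvTrie) (p q : List Char) :
    pvGetNode t (p ++ q) = (pvGetNode t p).bind (fun n => pvGetNode n q) := by
  induction p generalizing t with
  | nil => simp [pvGetNode]
  | cons c cs ih =>
      cases t with
      | mk b r ch =>
        simp only [List.cons_append, pvGetNode, pvChildren]
        cases pvChildGet ch c with
        | none => simp
        | some n => simp [ih]

theorem pvChildGet_set_eq : ∀ (ch : PvChildren) (c : Char) (n : PvTrie),
    pvChildGet (pvChildSet ch c n) c = some n
  | .nil, c, n => by simp [pvChildSet, pvChildGet]
  | .cons c' t rest, c, n => by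
      by_cases h : c = c'
      · simp [pvChildSet, pvChildGet, h]
      · simp [pvChildSet, pvChildGet, h, pvChildGet_set_eq rest c n]

theorem pvChildGet_set_ne : ∀ (ch : PvChildren) (c c' : Char) (n : PvTrie), c' ≠ c →
    pvChildGet (pvChildSet ch c n) c' = pvChildGet ch c'
  | .nil, c, c', n, h => by simp [pvChildSet, pvChildGet, h]
  | .cons c0 t rest, c, c', n, h => by
      by_cases h0 : c = c0
      · subst h0
        simp [pvChildSet, pvChildGet, h]
      · simp only [pvChildSet, pvChildGet, if_neg h0]
        by_cases h1 : c' = c0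
        · simp [h1]
        · simp [h1, pvChildGet_set_ne rest c c' n h]

theorem pvObs_emptyNode (p : List Char) :
    pvObs (pvGetNode (PvTrie.mk false "" .nil) p) = (false, "") := by
  cases p <;> simp [pvGetNode, pvChildren, pvChildGet, pvObs]

-- effect of one insertion on the observation at any path
theorem pvObs_insert (w : List Char) : ∀ (t : PvTrie) (rw : String) (p : List Char),
    pvObs (pvGetNode (pvInsert t w rw) p) =
      if p = w then
        (true, if (pvObs (pvGetNode t w)).1 then (pvObs (pvGetNode t w)).2 else rw)
      else pvObs (pvGetNode t p) := by
  induction w with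
  | nil =>
      intro t rw p
      cases t with
      | mk b r ch =>
        cases p with
        | nil => cases b <;> simp [pvInsert, pvGetNode, pvObs]
        | cons c cs => cases b <;> simp [pvInsert, pvGetNode, pvChildren, pvObs]
  | cons wc ws ih =>
      intro t rw p
      cases t with
      | mk b r ch =>
        cases p with
        | nil => simp [pvInsert, pvGetNode, pvObs]
        | cons c cs =>
            by_cases hc : c = wc
            · subst hc
              simp only [pvInsert, pvGetNode, pvChildren, pvChildGet_set_eq]
              cases hg : pvChildGet ch c with
              | none =>
                  rw [ih]
                  simp only [pvObs_emptyNode, hg]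
                  by_cases hcs : cs = ws
                  · simp [hcs, pvGetNode, pvChildren, hg, pvObs_none, pvObs_emptyNode]
                  · simp [hcs, pvGetNode, pvChildren, hg, pvObs_none, pvObs_emptyNode]
              | some n =>
                  rw [ih]
                  by_cases hcs : cs = ws
                  · simp [hcs, pvGetNode, pvChildren, hg]
                  · simp [hcs, pvGetNode, pvChildren, hg]
            · have hne : ¬ (c :: cs = wc :: ws) := by simp [hc]
              simp [pvInsert, pvGetNode, pvChildren, hne,
                    pvChildGet_set_ne ch wc c _ hc]

theorem pvIsRootAt_insert (t : PvTrie) (w : List Char) (rw : String) (p : List Char) :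
    pvIsRootAt (pvInsert t w rw) p = (decide (p = w) || pvIsRootAt t p) := by
  unfold pvIsRootAt
  rw [pvObs_insert]
  by_cases hp : p = w
  · subst hp; simp
  · simp [hp]

theorem pvRootAt_insert (t : PvTrie) (w : List Char) (rw : String) (p : List Char) :
    pvRootAt (pvInsert t w rw) p =
      if p = w then (if pvIsRootAt t w then pvRootAt t w else rw) else pvRootAt t p := by
  unfold pvRootAt pvIsRootAt
  rw [pvObs_insert]
  by_cases hp : p = w
  · subst hp; simp
  · simp [hp]

-- the built trie: roots are exactly the (spelled) dictionary words
theorem pvIsRootAt_build (ws : List String) (t : PvTrie) (p : List Char) :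
    pvIsRootAt (ws.foldl (fun t w => pvInsert t w.toList w) t) p =
      (ws.any (fun w => decide (p = w.toList)) || pvIsRootAt t p) := by
  induction ws generalizing t with
  | nil => simp
  | cons w rest ih =>
      simp only [List.foldl_cons, ih, pvIsRootAt_insert, List.any_cons]
      cases decide (p = w.toList) <;> simp

-- invariant: a root node's root_word is its spelled path
theorem pvRootAt_build (ws : List String) (t : PvTrie) (p : List Char)
    (hinv : pvIsRootAt t p = true → pvRootAt t p = String.ofList p)
    (hr : pvIsRootAt (ws.foldl (fun t w => pvInsert t w.toList w) t) p = true) :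
    pvRootAt (ws.foldl (fun t w => pvInsert t w.toList w) t) p = String.ofList p := by
  induction ws generalizing t with
  | nil => exact hinv hr
  | cons w rest ih =>
      simp only [List.foldl_cons] at hr ⊢
      refine ih _ ?_ hr
      intro h1
      rw [pvRootAt_insert]
      by_cases hp : p = w.toList
      · subst hp
        by_cases h2 : pvIsRootAt t w.toList = true
        · simp [h2, hinv h2]
        · simp only [Bool.not_eq_true] at h2
          simp [h2]
      · rw [pvIsRootAt_insert] at h1
        simp only [hp, decide_false, Bool.false_or] at h1
        simp [hp, hinv h1]

-- empty trie has no roots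
theorem pvIsRootAt_empty (p : List Char) :
    pvIsRootAt (PvTrie.mk false "" .nil) p = false := by
  simp [pvIsRootAt, pvObs_emptyNode]

-- scan returns the word when no tested prefix can be a root
theorem pvScan_of_forall_not (S : List String) (w : String) (rest : List Char) :
    ∀ (pre : List Char), (∀ q c, String.ofList (pre ++ q ++ [c]) ∉ S) →
    pvScan S w pre rest = w := by
  induction rest with
  | nil => intro pre _; rfl
  | cons c cs ih =>
      intro pre h
      have h0 : String.ofList (pre ++ [c]) ∉ S := by
        have := h [] c; simpa using this
      simp only [pvScan, h0, if_false]
      exact ih (pre ++ [c]) (fun q c' => by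
        have := h ([c] ++ q) c'; simpa using this)

-- A's walk equals the reference scan
theorem pvFindRoot_eq_scan (T : PvTrie) (S : List String)
    (hroot : ∀ p, pvIsRootAt T p = true ↔ String.ofList p ∈ S)
    (hword : ∀ p, pvIsRootAt T p = true → pvRootAt T p = String.ofList p)
    (w : String) :
    ∀ (rest pre : List Char) (n : PvTrie), pvGetNode T pre = some n →
      pvFindRoot n rest w = pvScan S w pre rest := by
  intro rest
  induction rest with
  | nil => intro pre n _; rfl
  | cons c cs ih =>
      intro pre n hn
      have hstep : pvGetNode T (pre ++ [c]) = pvChildGet (pvChildren n) c := by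
        rw [pvGetNode_append, hn]
        cases n with
        | mk b r ch =>
          simp only [Option.bind_some, pvGetNode, pvChildren]
          cases pvChildGet ch c <;> rfl
      cases hg : pvChildGet (pvChildren n) c with
      | none =>
          have hnone : pvGetNode T (pre ++ [c]) = none := by rw [hstep, hg]
          have hnotmem : String.ofList (pre ++ [c]) ∉ S := by
            intro hmem
            have := (hroot (pre ++ [c])).mpr hmem
            unfold pvIsRootAt at this
            simp [hnone, pvObs_none] at this
          simp only [pvFindRoot, hg, pvScan, hnotmem, if_false]
          refine (pvScan_of_forall_not S w cs (pre ++ [c]) ?_).symm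
          intro q c' hmem
          have h1 := (hroot (pre ++ [c] ++ q ++ [c'])).mpr (by simpa using hmem)
          unfold pvIsRootAt at h1
          rw [show pre ++ [c] ++ q ++ [c'] = (pre ++ [c]) ++ (q ++ [c']) by simp,
              pvGetNode_append, hnone] at h1
          simp [pvObs_none] at h1
      | some m =>
          have hm : pvGetNode T (pre ++ [c]) = some m := by rw [hstep, hg]
          cases hb : pvIsRoot m with
          | true =>
              have hr : pvIsRootAt T (pre ++ [c]) = true := by
                unfold pvIsRootAt; simp [hm, pvObs_some, hb]
              have hmem := (hroot (pre ++ [c])).mp hr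
              have hval := hword _ hr
              unfold pvRootAt at hval
              rw [hm, pvObs_some] at hval
              simp only [pvFindRoot, hg, hb, pvScan, hmem, if_true, if_pos]
              exact hval
          | false =>
              have hr : pvIsRootAt T (pre ++ [c]) = false := by
                unfold pvIsRootAt; simp [hm, pvObs_some, hb]
              have hnotmem : String.ofList (pre ++ [c]) ∉ S := by
                intro hmem; rw [(hroot _).mpr hmem] at hr; exact absurd hr (by simp)
              simp only [pvFindRoot, hg, hb, if_false, pvScan, hnotmem]
              exact ih (pre ++ [c]) m hm

-- B's index loop equals the reference scan
theorem pvSrGo_eq_scan (roots : List String) (S : List String)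
    (hmem : ∀ x : String, x ∈ roots ↔ x ∈ S) (w : String) :
    ∀ (k : Nat), k ≤ w.toList.length →
      pvSrGo roots w (k + 1) = pvScan S w (w.toList.take k) (w.toList.drop k) := by
  have hlen : PySem.Str.len w = (w.toList.length : Int) := by
    simp [PySem.Str.len_eq, String.length_toList]
  intro k hk
  induction hn : w.toList.length - k generalizing k with
  | zero =>
      have hkl : k = w.toList.length := by omega
      subst hkl
      have h1 : ¬ (((w.toList.length + 1 : Nat) : Int) ≤ PySem.Str.len w) := by
        rw [hlen]; push_cast; omega
      rw [pvSrGo, dif_neg h1, List.drop_length]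
      rfl
  | succ n ihn =>
      have hklt : k < w.toList.length := by omega
      have hle : (((k + 1 : Nat)) : Int) ≤ PySem.Str.len w := by
        rw [hlen]; push_cast; omega
      rw [pvSrGo, dif_pos hle]
      have hsl : PySem.Str.slice w none (some ((k + 1 : Nat) : Int)) =
          String.ofList (w.toList.take (k + 1)) := by
        have : (PySem.Str.slice w none (some ((k + 1 : Nat) : Int))).toList =
            w.toList.take (k + 1) := by
          rw [PySem.Str.toList_slice, PySem.Chars.slice_eq_listSlice,
              PySem.List.slice_to]
          · simp
          · positivity
        rw [← this, String.ofList_toList]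
      have hdc : w.toList.drop k = w.toList[k] :: w.toList.drop (k + 1) :=
        List.drop_eq_getElem_cons hklt
      have htake : w.toList.take k ++ [w.toList[k]] = w.toList.take (k + 1) := by
        rw [List.take_add_one, List.getElem?_eq_getElem hklt]; rfl
      rw [hdc]
      simp only [pvScan, htake]
      by_cases hmem' : String.ofList (w.toList.take (k + 1)) ∈ S
      · have hct : PySem.Set.contains roots (String.ofList (w.toList.take (k + 1))) = true :=
          (PySem.Set.contains_iff _ _).mpr ((hmem _).mpr hmem')
        rw [hsl, hct]
        simp [hmem']
      · have hcf : PySem.Set.contains roots (String.ofList (w.toList.take (k + 1))) = false := by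
          rw [Bool.eq_false_iff]
          intro h
          exact hmem' ((hmem _).mp ((PySem.Set.contains_iff _ _).mp h))
        rw [hsl, hcf]
        simp only [Bool.false_eq_true, if_false, hmem', if_false]
        exact ihn (k + 1) (by omega) (by omega)

-- per-word equality of the two programs
theorem pvWord_eq (dictionary : List String) (w : String) :
    pvFindRoot
      ((PySem.List.sorted dictionary (fun w => (PySem.Str.len w : Int))).foldl
        (fun t w => pvInsert t w.toList w) (PvTrie.mk false "" .nil)) w.toList w =
    pvSrGo (PySem.Set.ofList dictionary) w 1 := by
  set ws := PySem.List.sorted dictionary (fun w => (PySem.Str.len w : Int)) with hws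
  set T := ws.foldl (fun t w => pvInsert t w.toList w) (PvTrie.mk false "" .nil) with hT
  have hroot : ∀ p, pvIsRootAt T p = true ↔ String.ofList p ∈ dictionary := by
    intro p
    rw [hT, pvIsRootAt_build, pvIsRootAt_empty]
    simp only [Bool.or_false, List.any_eq_true, decide_eq_true_eq]
    constructor
    · rintro ⟨x, hx, rfl⟩
      rw [String.ofList_toList]
      exact (PySem.List.mem_sorted _ _ _ _).mp hx
    · intro hmem
      exact ⟨String.ofList p, (PySem.List.mem_sorted _ _ _ _).mpr hmem, String.toList_ofList.symm⟩
  have hword : ∀ p, pvIsRootAt T p = true → pvRootAt T p = String.ofList p := by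
    intro p hp
    rw [hT] at hp ⊢
    refine pvRootAt_build ws _ p ?_ hp
    intro h
    rw [pvIsRootAt_empty] at h
    exact absurd h (by simp)
  have hA := pvFindRoot_eq_scan T dictionary hroot hword w w.toList [] T rfl
  have hB := pvSrGo_eq_scan (PySem.Set.ofList dictionary) dictionary
      (fun x => PySem.Set.mem_ofList _ _) w 0 (Nat.zero_le _)
  simp only [List.take_zero, List.drop_zero] at hB
  rw [hA]
  exact hB.symm

-- ===== VERDICT (by name: the statement is the Claim_ definition above) =====
theorem replaceWords4_spec : Claim_equal_replaceWords4 := by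
  intro dictionary sentence _
  unfold Spec_replaceWords4 replaceWords4 replaceWords4_alt
  refine congrArg (PySem.Str.join " ") ?_
  refine List.map_congr_left ?_
  intro w _
  exact pvWord_eq dictionary w
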